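-- pv_equiv track=rewrite | github.com/ngoctuhan/Office-Bot-Rasa | src/nlu/ner/regex_extractor.py | get_entities_code
-- ===== SOURCE A (Python) =====
-- import copy
--
-- def get_entities_code(message):
--     arr_mess = message.split(' ')
--     code = None
--     for i, word in enumerate(arr_mess):
--         if word.find('dh')!=-1:
--             code = copy.deepcopy(word)
--             for j in range(i+1, len(arr_mess)):
--                 check = True
--                 word_sup = arr_mess[j]
--                 for c in word_sup:
--                     if c not in ['0', '1', '2', '3', '4', '5', '6', '7', '8', '9']:
--                         check = False
--                         break
--                 if check == False:
--                     break
--                 else :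
--                     code += arr_mess[j]
--     if code == 'dh':
--         return None
--     return code
-- ===== SOURCE B (Python) =====
-- def get_entities_code(message):
--     code = None
--     collecting = False
--     for word in message.split(' '):
--         if 'dh' in word:
--             code = word
--             collecting = True
--         elif collecting and all(c in '0123456789' for c in word):
--             code += word
--         else:
--             collecting = False
--     if code == 'dh':
--         return None
--     return code
-- ===== Notes on version B (the rewrite author's own statement) =====
-- stated objective: simpler
-- what changed: Replaces the outer loop that re-scans the whole tail with a nested inner loop at every code word by a single flat pass over the words keeping a collecting flag and appending digit words directly to the accumulated code.
import Mathlib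
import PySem

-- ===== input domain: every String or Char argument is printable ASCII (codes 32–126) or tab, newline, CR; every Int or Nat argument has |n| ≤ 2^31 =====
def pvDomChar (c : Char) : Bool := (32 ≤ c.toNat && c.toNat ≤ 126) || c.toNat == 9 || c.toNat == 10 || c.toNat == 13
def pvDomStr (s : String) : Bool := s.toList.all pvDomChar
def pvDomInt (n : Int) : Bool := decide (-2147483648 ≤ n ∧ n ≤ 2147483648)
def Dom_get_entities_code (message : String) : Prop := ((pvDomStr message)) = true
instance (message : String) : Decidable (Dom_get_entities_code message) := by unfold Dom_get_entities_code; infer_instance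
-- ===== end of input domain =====

-- B replaces A's outer loop with nested re-scan (an inner loop over the tail for every 'dh' word)
-- by a single flat pass maintaining a `collecting` flag: objective 'simpler'.


-- Both ports work on words as List Char (PySem string functions are defined on List Char).

-- ===== PORT A =====
-- literal port of A's innermost loop: check = every char of the word is in the digit list
def pvACheck (w : List Char) : Bool :=
  w.all (fun c => ['0','1','2','3','4','5','6','7','8','9'].contains c)

-- A's inner 'for j in range(i+1, len(arr))' with break, as structural recursion over the tail
def pvAAppend (code : List Char) : List (List Char) → List Char
  | [] => code
  | w :: t => if pvACheck w then pvAAppend (code ++ w) t else code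

-- A's outer loop: the index i only serves to address the tail arr[i+1:], so recurse on suffixes
def pvAOuter : List (List Char) → Option (List Char) → Option (List Char)
  | [], code => code
  | w :: t, code =>
      pvAOuter t (if PySem.Chars.find w ['d','h'] != -1 then some (pvAAppend w t) else code)

def get_entities_code (message : String) : Option String :=
  let code := pvAOuter (PySem.Chars.splitOn message.toList [' ']) none
  if code = some ['d','h'] then none else code.map String.ofList

-- ===== PORT B =====
def pvBDigit (w : List Char) : Bool :=
  w.all (fun c => "0123456789".toList.contains c)

def pvBStep (st : Option (List Char) × Bool) (w : List Char) : Option (List Char) × Bool :=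
  if PySem.Chars.isIn ['d','h'] w then (some w, true)
  else if st.2 && pvBDigit w then (st.1.map (fun s => s ++ w), true)
  else (st.1, false)

def get_entities_code_alt (message : String) : Option String :=
  let st := (PySem.Chars.splitOn message.toList [' ']).foldl pvBStep (none, false)
  if st.1 = some ['d','h'] then none else st.1.map String.ofList

-- ===== PRECONDITION & SPEC =====
def Spec_get_entities_code (message : String) (out : Option String) : Prop := out = get_entities_code_alt message
instance (message : String) (out : Option String) : Decidable (Spec_get_entities_code message out) := by unfold Spec_get_entities_code; infer_instance

-- ===== CLAIM (what is proved, stated in full; the proofs are below) =====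
def Claim_equal_get_entities_code : Prop := ∀ (message : String), Dom_get_entities_code message → Spec_get_entities_code message (get_entities_code message)

-- ===== LEMMAS AND PROOFS =====

-- A's and B's "'dh' in word" tests agree
theorem pv_dh_eq (w : List Char) :
    (PySem.Chars.find w ['d','h'] != -1) = PySem.Chars.isIn ['d','h'] w := by
  by_cases h : ['d','h'] <:+: w
  · simp [(PySem.Chars.find_ne_neg_one_iff w ['d','h']).mpr h,
      (PySem.Chars.isIn_iff_infix ['d','h'] w).mpr h]
  · simp [(PySem.Chars.find_eq_neg_one_iff w ['d','h']).mpr h,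
      Bool.eq_false_iff.mpr (fun hc => h ((PySem.Chars.isIn_iff_infix ['d','h'] w).mp hc))]

-- A's and B's digit tests agree
theorem pv_check_eq (w : List Char) : pvACheck w = pvBDigit w := rfl

-- the digit run collected by A factors out of the accumulator
theorem pvAAppend_factor (t : List (List Char)) (c : List Char) :
    pvAAppend c t = c ++ pvAAppend [] t := by
  induction t generalizing c with
  | nil => simp [pvAAppend]
  | cons w t ih =>
    by_cases h : pvACheck w = true
    · rw [pvAAppend, pvAAppend, if_pos h, if_pos h]
      simp only [List.nil_append]
      rw [ih (c ++ w), ih w, List.append_assoc]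
    · simp [pvAAppend, h]

-- joint invariant: B's flat pass from (c, false) computes A's outer loop; from (some s, true)
-- it computes A's outer loop after pre-committing s extended by the leading digit run
theorem pv_main (t : List (List Char)) :
    (∀ c : Option (List Char), (t.foldl pvBStep (c, false)).1 = pvAOuter t c) ∧
    (∀ s : List Char, (t.foldl pvBStep (some s, true)).1 = pvAOuter t (some (s ++ pvAAppend [] t))) := by
  induction t with
  | nil => simp [pvAOuter, pvAAppend]
  | cons w t ih =>
    have hfind := pv_dh_eq w
    constructor
    · intro c
      by_cases hdh : PySem.Chars.isIn ['d','h'] w = true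
      · rw [List.foldl_cons, show pvBStep (c, false) w = (some w, true) by
          simp [pvBStep, hdh], ih.2 w, pvAOuter, if_pos (by simp [hfind, hdh]),
          pvAAppend_factor t w]
      · rw [List.foldl_cons, show pvBStep (c, false) w = (c, false) by
          simp [pvBStep, hdh], ih.1 c, pvAOuter, if_neg (by simp [hfind, hdh])]
    · intro s
      by_cases hdh : PySem.Chars.isIn ['d','h'] w = true
      · rw [List.foldl_cons, show pvBStep (some s, true) w = (some w, true) by
          simp [pvBStep, hdh], ih.2 w, pvAOuter, if_pos (by simp [hfind, hdh]),
          pvAAppend_factor t w]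
      · by_cases hdig : pvBDigit w = true
        · rw [List.foldl_cons, show pvBStep (some s, true) w = (some (s ++ w), true) by
            simp [pvBStep, hdh, hdig], ih.2 (s ++ w), pvAOuter,
            if_neg (by simp [hfind, hdh]),
            show pvAAppend [] (w :: t) = w ++ pvAAppend [] t by
              rw [pvAAppend, if_pos (pv_check_eq w ▸ hdig)]
              simp only [List.nil_append]
              exact pvAAppend_factor t w]
          simp
        · rw [List.foldl_cons, show pvBStep (some s, true) w = (some s, false) by
            simp [pvBStep, hdh, hdig], ih.1 (some s), pvAOuter,
            if_neg (by simp [hfind, hdh]),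
            show pvAAppend [] (w :: t) = [] by
              rw [pvAAppend, if_neg (by rw [pv_check_eq]; simp [hdig])]]
          simp

-- ===== VERDICT (by name: the statement is the Claim_ definition above) =====
theorem get_entities_code_spec : Claim_equal_get_entities_code := by
  intro message _
  unfold Spec_get_entities_code get_entities_code get_entities_code_alt
  simp only [(pv_main (PySem.Chars.splitOn message.toList [' '])).1 none]
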